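-- pv_equiv track=rewrite | github.com/daniel-reich/ubiquitous-fiesta | EWZqYT4QGMYotfQTu_16.py | tap_code
-- ===== SOURCE A (Python) =====
-- def tap_code(txt):
--     code = [["a","b","c","d","e"],
--             ["f","g","h","i","j"],
--             ["l","m","n","o","p"],
--             ["q","r","s","t","u"],
--             ["v","w","x","y","z"]]
--     if txt[0] == ".":
--         txt = txt.split(" ")
--         for i in range(0,len(txt)):
--             if i%2 != 0:
--                 txt[i] = code[txt[i-1].count(".")-1][txt[i].count(".")-1]
--                 txt[i-1] = ""
--         return "".join(txt)
--     else:
--         for element in txt: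
--             if element == "k":
--                 txt = txt.replace(element, ". ... ")
--                 continue
--             for i in range(0,len(code)):
--                 if element in code[i]:
--                     index = [i+1, code[i].index(element)+1]
--                     txt = txt.replace(element, "."*(i+1)+" "+"."*(code[i].index(element)+1)+" ",1)
--         return txt[:-1]
-- ===== SOURCE B (Python) =====
-- def _pairs(parts):
--     # decode dot-group pieces two at a time; an unpaired trailing piece is kept as-is
--     if len(parts) < 2:
--         return parts[:]
--     r = parts[0].count(".")
--     c = parts[1].count(".")
--     p = (r - 1) * 5 + (c - 1)
--     ch = chr(97 + p) if p < 10 else chr(98 + p)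
--     return [ch] + _pairs(parts[2:])
--
--
-- def _piece(ch):
--     if ch == "k":
--         return ". ... "
--     if "a" <= ch <= "z":
--         p = ord(ch) - 97 if ch < "k" else ord(ch) - 98
--         return "." * (p // 5 + 1) + " " + "." * (p % 5 + 1) + " "
--     return ch
--
--
-- def tap_code(txt):
--     if txt.startswith("."):
--         return "".join(_pairs(txt.split(" ")))
--     return "".join(_piece(ch) for ch in txt)[:-1]
-- ===== Notes on version B (the rewrite author's own statement) =====
-- stated objective: faster
-- what changed: B drops the 5x5 grid and all in-place replace/set mutation: encode maps each character to its dot piece by code-point arithmetic (p//5, p%5 with the k-skip) and joins the pieces in one pass, decode recurses over the split dot groups two at a time computing the letter from (rowdots-1)*5+(coldots-1); this removes A's whole-string replace scan per letter.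
-- outside the precondition, e.g. on tap_code('. a'): A returns 'e', B returns '`'
import Mathlib
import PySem

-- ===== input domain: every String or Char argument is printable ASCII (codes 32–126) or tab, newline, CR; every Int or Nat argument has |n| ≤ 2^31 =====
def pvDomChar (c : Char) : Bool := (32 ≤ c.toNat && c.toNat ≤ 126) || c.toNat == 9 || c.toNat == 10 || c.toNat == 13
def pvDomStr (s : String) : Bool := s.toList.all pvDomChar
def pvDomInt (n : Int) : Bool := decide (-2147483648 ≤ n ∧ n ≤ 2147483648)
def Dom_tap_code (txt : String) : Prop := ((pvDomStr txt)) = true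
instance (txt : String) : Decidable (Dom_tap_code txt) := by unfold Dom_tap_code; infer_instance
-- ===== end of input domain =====

-- B replaces A's 2D-grid scans and in-place string/list mutation by direct code-point
-- arithmetic over the char (encode) resp. the dot-group pair (decode): simpler, no grid.

-- ===== PORT A =====

-- the 5×5 tap-code grid (rows of 1-char strings in Python, rows of Chars here)
def pvCode : List (List Char) := [['a','b','c','d','e'],
                                  ['f','g','h','i','j'],
                                  ['l','m','n','o','p'],
                                  ['q','r','s','t','u'],
                                  ['v','w','x','y','z']]

-- hand port of s.replace(old, new, 1) for a SINGLE-character old (exact there: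
-- Python replaces the first occurrence and leaves the rest untouched)
def pvReplaceOnce (s : List Char) (old : Char) (new : List Char) : List Char :=
  match s with
  | [] => []
  | c :: t => if c = old then new ++ t else c :: pvReplaceOnce t old new

-- one iteration of A's decode loop body (i odd: txt[i] = code[...][...]; txt[i-1] = "")
def pvDecStep (ps : List (List Char)) (i : Int) : List (List Char) :=
  if PySem.Int.mod i 2 ≠ 0 then
    PySem.List.pySetD (PySem.List.pySetD ps i
      [PySem.List.pyGetD
        (PySem.List.pyGetD pvCode ((PySem.Chars.count (PySem.List.pyGetD ps (i-1) []) ['.'] : Int) - 1) [])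
        ((PySem.Chars.count (PySem.List.pyGetD ps i []) ['.'] : Int) - 1) ' ']) (i-1) []
  else ps

-- A's inner encode loop: for i in range(0, len(code)): if element in code[i]: txt = txt.replace(...,1)
-- (the dead local 'index = [i+1, …]' of the Python is not materialised;
--  code[i].index(element) cannot raise under the membership guard, hence .getD 0)
def pvEncInner (cur : List Char) (el : Char) : List Char :=
  (PySem.List.pyRange 0 (pvCode.length : Int) 1).foldl (fun cur2 i =>
    let row := PySem.List.pyGetD pvCode i []
    if row.contains el then
      pvReplaceOnce cur2 el
        (List.replicate (i + 1).toNat '.' ++ [' '] ++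
         List.replicate ((PySem.List.index? row el).getD 0 + 1) '.' ++ [' '])
    else cur2) cur

-- one iteration of A's encode loop over the characters of the ORIGINAL txt
def pvEncStep (cur : List Char) (el : Char) : List Char :=
  if el = 'k' then PySem.Chars.replace cur ['k'] (". ... ".toList)
  else pvEncInner cur el

-- A: txt[0] raises IndexError on empty txt (excluded by Pre_); ' ' is a dummy default
def tap_code (txt : String) : String :=
  let cs := txt.toList
  if PySem.List.pyGetD cs 0 ' ' = '.' then
    let parts := PySem.Chars.splitOn cs [' ']
    String.ofList (PySem.Chars.join []
      ((PySem.List.pyRange 0 (parts.length : Int) 1).foldl pvDecStep parts))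
  else
    String.ofList (PySem.List.slice (List.foldl pvEncStep cs cs) none (some (-1)))

-- ===== PORT B =====

-- chr(97+p) if p < 10 else chr(98+p) for p = (r-1)*5 + (c-1)
def pvLetter (r c : Nat) : Char :=
  let p : Int := ((r : Int) - 1) * 5 + ((c : Int) - 1)
  if p < 10 then Char.ofNat (97 + p).toNat else Char.ofNat (98 + p).toNat

-- B's recursive pair decoder _pairs
def pvPairs : List (List Char) → List (List Char)
  | a :: b :: rest =>
      [pvLetter (PySem.Chars.count a ['.']) (PySem.Chars.count b ['.'])] :: pvPairs rest
  | rest => rest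

-- B's _piece
def pvPiece (c : Char) : List Char :=
  if c = 'k' then ". ... ".toList
  else if 'a' ≤ c ∧ c ≤ 'z' then
    let p : Int := if c < 'k' then (c.toNat : Int) - 97 else (c.toNat : Int) - 98
    List.replicate (PySem.Int.floordiv p 5 + 1).toNat '.' ++ [' '] ++
    List.replicate (PySem.Int.mod p 5 + 1).toNat '.' ++ [' ']
  else [c]

def tap_code_alt (txt : String) : String :=
  if PySem.Chars.startswith txt.toList ['.'] then
    String.ofList (PySem.Chars.join [] (pvPairs (PySem.Chars.splitOn txt.toList [' '])))
  else
    String.ofList (PySem.List.slice (PySem.Chars.join [] (txt.toList.map pvPiece)) none (some (-1)))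

-- ===== PRECONDITION & SPEC =====

-- every dot group that gets PAIRED by the decoder carries 1..5 dots
def pvGood (ps : List (List Char)) : Prop :=
  ∀ i < 2 * (ps.length / 2),
    1 ≤ PySem.Chars.count (ps.getD i []) ['.'] ∧ PySem.Chars.count (ps.getD i []) ['.'] ≤ 5

-- Pre_ excludes the empty string (txt[0] raises IndexError in A) and malformed decode
-- inputs — a leading period but some paired dot group with 0 or ≥6 dots: with ≥6 dots A raises
-- IndexError, with 0 dots neither A's negative-index grid lookup nor B's arithmetic is a
-- specified decoding, and the two return different unspecified letters.
def Pre_tap_code (txt : String) : Prop :=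
  txt ≠ "" ∧ (PySem.Chars.startswith txt.toList ['.'] = true →
    pvGood (PySem.Chars.splitOn txt.toList [' ']))

instance (txt : String) : Decidable (Pre_tap_code txt) := by
  unfold Pre_tap_code pvGood; infer_instance

def pvWitness_tap_code : String := "ab k!"

def Spec_tap_code (txt : String) (out : String) : Prop := out = tap_code_alt txt
instance (txt : String) (out : String) : Decidable (Spec_tap_code txt out) := by
  unfold Spec_tap_code; infer_instance

-- ===== CLAIM (what is proved, stated in full; the proofs are below) =====
def Claim_equal_tap_code : Prop :=
  ∀ (txt : String), Dom_tap_code txt → Pre_tap_code txt → Spec_tap_code txt (tap_code txt)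

-- ===== LEMMAS AND PROOFS =====

-- ---- decode side ----

-- what A's grid lookup yields from the two dot counts
def pvLetterA (r c : Nat) : Char :=
  PySem.List.pyGetD (PySem.List.pyGetD pvCode ((r : Int) - 1) []) ((c : Int) - 1) ' '

-- the list A's decode loop leaves behind: ["", letter, "", letter, ..., leftover]
def pvExpand : List (List Char) → List (List Char)
  | a :: b :: rest =>
      [] :: [pvLetterA (PySem.Chars.count a ['.']) (PySem.Chars.count b ['.'])] :: pvExpand rest
  | rest => rest

lemma pvLetter_eq : ∀ r < 6, ∀ c < 6, 1 ≤ r → 1 ≤ c → pvLetterA r c = pvLetter r c := by decide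

lemma pvMod2 (k : Nat) : PySem.Int.mod (k : Int) 2 = ((k % 2 : Nat) : Int) := by
  exact_mod_cast PySem.Int.mod_natCast k 2

lemma pvGetD_append {α : Type} (done : List α) (v : List α) (j : Nat) (hj : j < v.length) (d : α) :
    PySem.List.pyGetD (done ++ v) ((done.length + j : Nat) : Int) d = v[j] := by
  rw [PySem.List.pyGetD_natCast]
  rw [List.getD, List.getElem?_append_right (by omega)]
  rw [show done.length + j - done.length = j by omega, List.getElem?_eq_getElem hj]
  rfl

lemma pvDec_loop : ∀ (rest done : List (List Char)), done.length % 2 = 0 →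
    (PySem.List.pyRange (done.length : Int) ((done.length : Int) + rest.length) 1).foldl
      pvDecStep (done ++ rest) = done ++ pvExpand rest := by
  intro rest
  induction rest using pvExpand.induct with
  | case2 rest hshape =>
    intro done hd
    rcases rest with _ | ⟨x, _ | ⟨y, r⟩⟩
    · rw [PySem.List.pyRange_one_eq_nil (by simp)]; rfl
    · rw [show ((done.length : Int) + ([x]:List (List Char)).length) = (done.length : Int) + 1 by simp,
          PySem.List.pyRange_one_singleton]
      simp only [List.foldl_cons, List.foldl_nil]
      rw [pvDecStep, if_neg (by rw [pvMod2]; omega)]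
      rfl
    · exact (hshape x y r rfl).elim
  | case1 a b r ih =>
    intro done hd
    set k := done.length with hk
    have hlen : ((a :: b :: r : List (List Char)).length : Int) = (r.length : Int) + 2 := by
      simp; omega
    rw [hlen]
    rw [PySem.List.pyRange_one_cons (by omega), List.foldl_cons]
    rw [PySem.List.pyRange_one_cons (by omega), List.foldl_cons]
    rw [show pvDecStep (done ++ a :: b :: r) (k : Int) = done ++ a :: b :: r by
      rw [pvDecStep, if_neg (by rw [pvMod2]; omega)]]
    have hread1 : PySem.List.pyGetD (done ++ a :: b :: r) ((k : Int) + 1 - 1) [] = a := by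
      rw [show ((k : Int) + 1 - 1) = ((k + 0 : Nat) : Int) by push_cast; ring]
      exact pvGetD_append done _ 0 (by simp) []
    have hread2 : PySem.List.pyGetD (done ++ a :: b :: r) ((k : Int) + 1) [] = b := by
      rw [show ((k : Int) + 1) = ((k + 1 : Nat) : Int) by push_cast; ring]
      exact pvGetD_append done _ 1 (by simp) []
    set ch := pvLetterA (PySem.Chars.count a ['.']) (PySem.Chars.count b ['.']) with hch
    have hcast : ((k : Int) + 1) = ((k + 1 : Nat) : Int) := by push_cast; ring
    have hmodpos : PySem.Int.mod ((k : Int) + 1) 2 ≠ 0 := by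
      rw [hcast, pvMod2]; omega
    have hstep : pvDecStep (done ++ a :: b :: r) ((k : Int) + 1) = (done ++ [[], [ch]]) ++ r := by
      rw [pvDecStep, if_pos hmodpos]
      rw [hread1, hread2]
      rw [hcast]
      rw [PySem.List.pySetD_natCast]
      rw [show ((k + 1 : Nat) : Int) - 1 = ((k : Nat) : Int) by push_cast; ring]
      rw [PySem.List.pySetD_natCast]
      rw [List.set_append, if_neg (by omega)]
      rw [List.set_append, if_neg (by omega)]
      rw [show k + 1 - k = 1 by omega, Nat.sub_self]
      simp [hch, pvLetterA]
    rw [hstep]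
    have harith1 : ((k : Int) + 1 + 1) = (((done ++ [[], [ch]]).length : Nat) : Int) := by
      simp [← hk]; ring
    have harith2 : ((k : Int) + ((r.length : Int) + 2))
        = (((done ++ [[], [ch]]).length : Nat) : Int) + (r.length : Int) := by
      simp [← hk]; ring
    rw [harith1, harith2]
    rw [ih (done ++ [[], [ch]]) (by simp [← hk]; omega)]
    simp [pvExpand, hch]

lemma pvFlatten_expand : ∀ (ps : List (List Char)), pvGood ps →
    (pvExpand ps).flatten = (pvPairs ps).flatten := by
  intro ps
  induction ps using pvExpand.induct with
  | case2 rest hshape =>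
    intro _
    rcases rest with _ | ⟨x, _ | ⟨y, r⟩⟩
    · rfl
    · rfl
    · exact (hshape x y r rfl).elim
  | case1 a b r ih =>
    intro hg
    have hlen : (a :: b :: r).length = r.length + 2 := by simp
    have h0 := hg 0 (by rw [hlen]; omega)
    have h1 := hg 1 (by rw [hlen]; omega)
    simp only [List.getD_cons_zero, List.getD_cons_succ] at h0 h1
    have hgr : pvGood r := by
      intro i hi
      have := hg (i + 2) (by rw [hlen]; omega)
      simpa [List.getD_cons_succ] using this
    show ([] :: [pvLetterA (PySem.Chars.count a ['.']) (PySem.Chars.count b ['.'])] :: pvExpand r).flatten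
        = ([pvLetter (PySem.Chars.count a ['.']) (PySem.Chars.count b ['.'])] :: pvPairs r).flatten
    simp only [List.flatten_cons, List.nil_append]
    rw [ih hgr]
    rw [pvLetter_eq _ (by omega) _ (by omega) (by omega) (by omega)]

-- ---- encode side ----

def pvKcode : List Char := ". ... ".toList

def pvFlatK (s : List Char) : List Char :=
  s.flatMap (fun c => if c = 'k' then pvKcode else [c])

def pvEncL (s : List Char) : List Char := (s.map pvPiece).flatten

def pvNoLow (l : List Char) : Prop := ∀ c ∈ l, ¬('a' ≤ c ∧ c ≤ 'z')

def pvMapK (b : Bool) (s : List Char) : List Char := if b then pvFlatK s else s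

lemma pvReplace_go_spec (w : List Char) : ∀ (fuel : Nat) (l acc : List Char), l.length ≤ fuel →
    PySem.Chars.replace.go ['k'] w fuel l acc =
      acc.reverse ++ l.flatMap (fun c => if c = 'k' then w else [c]) := by
  intro fuel
  induction fuel with
  | zero =>
    intro l acc h
    rw [PySem.Chars.replace.go.eq_def]
    cases l with
    | nil => simp
    | cons c t => simp at h
  | succ n ih =>
    intro l acc h
    rw [PySem.Chars.replace.go.eq_def]
    cases l with
    | nil => simp
    | cons c t =>
      simp only [List.isPrefixOf, List.flatMap_cons]
      by_cases hc : c = 'k'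
      · subst hc
        simp only [List.length_cons] at h
        rw [if_pos (by simp)]
        rw [ih _ _ (by simpa using Nat.le_of_succ_le_succ h)]
        simp
      · rw [if_neg (by simp; intro h'; exact hc h'.symm)]
        rw [ih _ _ (by simpa using Nat.le_of_succ_le_succ h)]
        simp [hc]

lemma pvReplace_single (s w : List Char) :
    PySem.Chars.replace s ['k'] w = s.flatMap (fun c => if c = 'k' then w else [c]) := by
  rw [PySem.Chars.replace]
  simp only [List.isEmpty_cons]
  rw [pvReplace_go_spec w s.length s [] le_rfl]
  simp

lemma pvFlatK_no_k (s : List Char) (hs : 'k' ∉ s) : pvFlatK s = s := by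
  induction s with
  | nil => rfl
  | cons c t ih =>
    simp only [List.mem_cons, not_or] at hs
    simp [pvFlatK, List.flatMap_cons, Ne.symm hs.1]
    exact ih hs.2

lemma pvK_not_mem_kcode' : 'k' ∉ pvKcode := by simp [pvKcode]

lemma pvFlatK_k_not_mem (s : List Char) : 'k' ∉ pvFlatK s := by
  intro hm
  simp only [pvFlatK, List.mem_flatMap] at hm
  obtain ⟨a, _, hm⟩ := hm
  by_cases h : a = 'k'
  · rw [if_pos h] at hm; exact absurd hm pvK_not_mem_kcode'
  · rw [if_neg h] at hm; simp at hm; exact h hm.symm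

lemma pvFlatK_append (u v : List Char) : pvFlatK (u ++ v) = pvFlatK u ++ pvFlatK v :=
  List.flatMap_append

lemma pvFlatK_cons_k (t : List Char) : pvFlatK ('k' :: t) = pvKcode ++ pvFlatK t := by
  simp [pvFlatK, List.flatMap_cons]

lemma pvReplaceK (s : List Char) :
    PySem.Chars.replace s ['k'] (". ... ".toList) = pvFlatK s := by
  rw [pvReplace_single]; unfold pvFlatK pvKcode; rfl

lemma pvNoLow_kcode : pvNoLow pvKcode := by
  intro c hc
  simp [pvKcode] at hc
  have h : c = '.' ∨ c = ' ' := by tauto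
  rcases h with rfl | rfl <;> decide

lemma pvNoLow_append (u v : List Char) (hu : pvNoLow u) (hv : pvNoLow v) :
    pvNoLow (u ++ v) := by
  intro c hc
  rcases List.mem_append.mp hc with h | h
  · exact hu c h
  · exact hv c h

lemma pvReplaceOnce_append (u v new : List Char) (el : Char) (hu : el ∉ u) :
    pvReplaceOnce (u ++ el :: v) el new = u ++ new ++ v := by
  induction u with
  | nil => simp [pvReplaceOnce]
  | cons c t ih =>
    simp only [List.mem_cons, not_or] at hu
    show (if c = el then _ else c :: pvReplaceOnce (t ++ el :: v) el new) = _
    rw [if_neg (fun h => hu.1 h.symm), ih hu.2]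
    simp

lemma char_le_iff (a b : Char) : a ≤ b ↔ a.toNat ≤ b.toNat := by
  rw [Char.le_def, UInt32.le_iff_toNat_le]; rfl

lemma pvInner_nolow (el : Char) (h : ¬('a' ≤ el ∧ el ≤ 'z')) (cur : List Char) :
    pvEncInner cur el = cur := by
  have hb : ¬(97 ≤ el.toNat ∧ el.toNat ≤ 122) := by simpa [char_le_iff] using h
  have hmem : ∀ row ∈ pvCode, row.contains el = false := by
    intro row hrow
    simp only [List.contains_eq_mem, decide_eq_false_iff_not]
    intro hel
    exact hb (by fin_cases hrow <;> fin_cases hel <;> decide)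
  have h0 := hmem _ (by decide : PySem.List.pyGetD pvCode 0 [] ∈ pvCode)
  have h1 := hmem _ (by decide : PySem.List.pyGetD pvCode 1 [] ∈ pvCode)
  have h2 := hmem _ (by decide : PySem.List.pyGetD pvCode 2 [] ∈ pvCode)
  have h3 := hmem _ (by decide : PySem.List.pyGetD pvCode 3 [] ∈ pvCode)
  have h4 := hmem _ (by decide : PySem.List.pyGetD pvCode 4 [] ∈ pvCode)
  unfold pvEncInner
  rw [(by decide : PySem.List.pyRange 0 (pvCode.length : Int) 1 = [0, 1, 2, 3, 4])]
  simp only [List.foldl_cons, List.foldl_nil, h0, h1, h2, h3, h4, Bool.false_eq_true, if_false]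

lemma pvInner_low (el : Char) (h : 'a' ≤ el ∧ el ≤ 'z') (hk : el ≠ 'k') (cur : List Char) :
    pvEncInner cur el = pvReplaceOnce cur el (pvPiece el) := by
  have hb : 97 ≤ el.toNat ∧ el.toNat ≤ 122 := by simpa [char_le_iff] using h
  have hn : el.toNat ≠ 107 := fun hc => hk (by rw [← Char.ofNat_toNat el, hc])
  have key : ∀ n, 97 ≤ n → n ≤ 122 → n ≠ 107 → Char.ofNat n ∈
      ['a','b','c','d','e','f','g','h','i','j','l','m','n','o','p','q','r','s','t','u','v','w','x','y','z'] := by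
    decide
  have hmem := key el.toNat hb.1 hb.2 hn
  rw [Char.ofNat_toNat] at hmem
  fin_cases hmem <;> rfl

lemma pvNoLow_piece (c : Char) : pvNoLow (pvPiece c) := by
  intro x hx
  by_cases hk : c = 'k'
  · subst hk; simp [pvPiece] at hx
    rcases hx with h | h | h
    · subst h; decide
    · subst h; decide
    · rcases h with h | h <;> (subst h; decide)
  · by_cases hl : 'a' ≤ c ∧ c ≤ 'z'
    · simp [pvPiece, hk, hl, List.mem_append, List.mem_replicate] at hx
      rcases hx with ⟨-, h⟩ | h | ⟨-, h⟩ | h <;> subst h <;> decide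
    · simp [pvPiece, hk, hl] at hx; subst hx; exact hl

lemma pvMapK_cons (b : Bool) (el : Char) (t : List Char) (hel : el ≠ 'k') :
    pvMapK b (el :: t) = el :: pvMapK b t := by
  cases b <;> simp [pvMapK, pvFlatK, List.flatMap_cons, hel]

lemma pvEnc_loop : ∀ (suf : List Char) (b : Bool) (done : List Char), pvNoLow done →
    List.foldl pvEncStep (done ++ pvMapK b suf) suf = done ++ pvEncL suf := by
  intro suf
  induction suf with
  | nil =>
    intro b done _
    cases b <;> rfl
  | cons el tail ih =>
    intro b done hd
    have hkd : 'k' ∉ done := fun hm => hd 'k' hm (by decide)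
    rw [List.foldl_cons]
    by_cases hel : el = 'k'
    · subst hel
      have hstep : pvEncStep (done ++ pvMapK b ('k' :: tail)) 'k'
          = (done ++ pvKcode) ++ pvMapK true tail := by
        rw [pvEncStep, if_pos rfl, pvReplaceK]
        show _ = (done ++ pvKcode) ++ pvFlatK tail
        cases b
        · show pvFlatK (done ++ 'k' :: tail) = _
          rw [pvFlatK_append, pvFlatK_no_k done hkd, pvFlatK_cons_k]
          rw [← List.append_assoc]
        · show pvFlatK (done ++ pvFlatK ('k' :: tail)) = _
          rw [pvFlatK_append, pvFlatK_no_k done hkd, pvFlatK_cons_k, pvFlatK_append,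
            pvFlatK_no_k pvKcode pvK_not_mem_kcode', pvFlatK_no_k _ (pvFlatK_k_not_mem tail)]
          rw [← List.append_assoc]
      rw [hstep, ih true (done ++ pvKcode) (pvNoLow_append _ _ hd pvNoLow_kcode)]
      simp [pvEncL, List.flatten_cons, pvPiece, pvKcode]
    · rw [pvMapK_cons b el tail hel]
      have hstep0 : pvEncStep (done ++ el :: pvMapK b tail) el
          = pvEncInner (done ++ el :: pvMapK b tail) el := by
        rw [pvEncStep, if_neg hel]
      by_cases hl : 'a' ≤ el ∧ el ≤ 'z'
      · have helm : el ∉ done := fun hm => hd el hm hl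
        rw [hstep0, pvInner_low el hl hel, pvReplaceOnce_append done _ _ el helm]
        rw [ih b (done ++ pvPiece el) (pvNoLow_append _ _ hd (pvNoLow_piece el))]
        simp [pvEncL, List.flatten_cons]
      · rw [hstep0, pvInner_nolow el hl]
        have : done ++ el :: pvMapK b tail = (done ++ [el]) ++ pvMapK b tail := by simp
        rw [this, ih b (done ++ [el]) (pvNoLow_append _ _ hd (by
          intro c hc; simp at hc; subst hc; exact hl))]
        have hpe : pvPiece el = [el] := by simp [pvPiece, hel, hl]
        simp [pvEncL, List.flatten_cons, hpe]

lemma pvJoin_flatten (l : List (List Char)) : PySem.Chars.join [] l = l.flatten := by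
  induction l with
  | nil => simp [PySem.Chars.join_nil]
  | cons a r ih =>
    cases r with
    | nil => simp [PySem.Chars.join_singleton]
    | cons b q =>
      rw [PySem.Chars.join_cons_cons]
      simp only [List.flatten_cons]
      rw [← List.flatten_cons, ih]
      simp

lemma pvHead_iff (cs : List Char) (hne : cs ≠ []) :
    (PySem.List.pyGetD cs 0 ' ' = '.') ↔ PySem.Chars.startswith cs ['.'] = true := by
  cases cs with
  | nil => exact absurd rfl hne
  | cons c t =>
    rw [PySem.List.pyGetD_zero_cons, PySem.Chars.startswith_iff]
    simp [List.cons_prefix_cons, eq_comm]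

-- ===== VERDICT (by name: the statement is the Claim_ definition above) =====
theorem tap_code_spec : Claim_equal_tap_code := by
  intro txt _ hpre
  obtain ⟨hne, hdec⟩ := hpre
  have hne' : txt.toList ≠ [] := fun h => hne (String.toList_eq_nil_iff.mp h)
  unfold Spec_tap_code
  simp only [tap_code, tap_code_alt]
  by_cases hsw : PySem.Chars.startswith txt.toList ['.'] = true
  · rw [if_pos ((pvHead_iff txt.toList hne').mpr hsw), if_pos hsw]
    have hl := pvDec_loop (PySem.Chars.splitOn txt.toList [' ']) [] (by simp)
    simp only [List.length_nil, Nat.cast_zero, zero_add, List.nil_append] at hl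
    rw [hl, pvJoin_flatten, pvJoin_flatten, pvFlatten_expand _ (hdec hsw)]
  · rw [if_neg (fun h => hsw ((pvHead_iff txt.toList hne').mp h)), if_neg hsw]
    have he := pvEnc_loop txt.toList false []
      (by intro c hc; simp at hc)
    simp only [pvMapK, Bool.false_eq_true, if_false, List.nil_append] at he
    rw [he, pvJoin_flatten]
    rfl
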